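-- pv_equiv track=rewrite | github.com/sirmar/yatzy-monorepo | bot/src/app/sim/dice_keep.py | keep_one_pair
-- ===== SOURCE A (Python) =====
-- from collections import Counter
--
-- def keep_n_of_face(dice: list[int], face: int, n: int) -> list[bool]:
--   keep_indices = set([i for i, d in enumerate(dice) if d == face][:n])
--   return [i in keep_indices for i in range(len(dice))]
--
-- def keep_best_single(dice: list[int]) -> list[bool]:
--   kept = [False] * len(dice)
--   kept[dice.index(max(dice))] = True
--   return kept
--
-- def keep_one_pair(dice: list[int]) -> list[bool]:
--   counts = Counter(dice)
--   pairs = [face for face, count in counts.items() if count >= 2]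
--   if pairs:
--     best_pair = max(pairs)
--     higher = [face for face in counts if face > best_pair and counts[face] == 1]
--     if higher:
--       pair_keep = keep_n_of_face(dice, best_pair, 2)
--       single_keep = keep_n_of_face(dice, max(higher), 1)
--       return [a or b for a, b in zip(pair_keep, single_keep)]
--     return keep_n_of_face(dice, best_pair, 2)
--   return keep_best_single(dice)
-- ===== SOURCE B (Python) =====
-- from collections import Counter
--
-- def keep_one_pair(dice: list[int]) -> list[bool]:
--   counts = Counter(dice)
--   pairs = [f for f, c in counts.items() if c >= 2]
--   if not pairs:
--     m = max(dice)            # no pair => all faces distinct: keep the single highest die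
--     return [d == m for d in dice]
--   p = max(pairs)
--   higher = [f for f, c in counts.items() if f > p and c == 1]
--   h = max(higher) if higher else None
--   out = []
--   rem = 2
--   for d in dice:
--     if d == p and rem > 0:   # keep the first two dice of the pair face
--       out.append(True)
--       rem -= 1
--     else:
--       out.append(d == h)     # plus the single highest kicker above it, if any
--   return out
-- ===== Notes on version B (the rewrite author's own statement) =====
-- stated objective: simpler
-- what changed: A builds per-face index sets via enumerate/slice helpers, materialises two boolean masks and ORs them with zip; B reads the pair face and kicker straight off Counter items and emits the mask in one budgeted pass over the dice (first two copies of the pair face, plus the kicker), and in the no-pair case (all faces distinct) simply marks the maximum die.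
import Mathlib
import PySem

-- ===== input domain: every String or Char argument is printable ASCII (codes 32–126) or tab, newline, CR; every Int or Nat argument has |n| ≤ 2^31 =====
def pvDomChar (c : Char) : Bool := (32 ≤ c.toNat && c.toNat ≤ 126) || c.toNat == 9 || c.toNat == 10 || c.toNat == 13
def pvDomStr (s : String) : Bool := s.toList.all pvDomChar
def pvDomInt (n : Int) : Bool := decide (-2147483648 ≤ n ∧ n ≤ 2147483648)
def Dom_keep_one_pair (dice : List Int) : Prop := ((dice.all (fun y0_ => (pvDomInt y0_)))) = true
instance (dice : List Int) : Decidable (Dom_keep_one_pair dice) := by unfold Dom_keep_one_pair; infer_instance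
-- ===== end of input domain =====

-- B replaces A's three helpers and index-set/zip machinery by one budgeted pass over the dice (objective: simpler).

-- ===== PORT A =====
def keep_n_of_face (dice : List Int) (face : Int) (n : Int) : List Bool :=
  let keep_indices : PySem.Set Int :=
    PySem.Set.ofList (PySem.List.slice
      (((PySem.List.enumerate dice 0).filter (fun q => q.2 == face)).map (·.1)) none (some n))
  (PySem.List.pyRange 0 (dice.length : Int) 1).map (fun i => PySem.Set.contains keep_indices i)

def keep_best_single (dice : List Int) : List Bool :=
  let kept := List.replicate dice.length false
  match PySem.List.max? dice (fun y => y) with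
  | none => []          -- Python: max([]) raises ValueError; excluded by Pre_
  | some m =>
    match PySem.List.index? dice m with
    | none => []        -- unreachable: the maximum is in the list
    | some i => kept.set i true

def keep_one_pair (dice : List Int) : List Bool :=
  let counts := PySem.Dict.counter dice
  let pairs := (counts.items.filter (fun fc => decide (2 ≤ fc.2))).map (·.1)
  if pairs ≠ [] then
    match PySem.List.max? pairs (fun y => y) with
    | none => []        -- unreachable: pairs ≠ []
    | some best_pair =>
      let higher := counts.keys.filter (fun f => decide (best_pair < f) && (counts.getD f 0 == 1))
      if higher ≠ [] then
        match PySem.List.max? higher (fun y => y) with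
        | none => []    -- unreachable: higher ≠ []
        | some hm =>
          let pair_keep := keep_n_of_face dice best_pair 2
          let single_keep := keep_n_of_face dice hm 1
          (pair_keep.zip single_keep).map (fun ab => ab.1 || ab.2)
      else keep_n_of_face dice best_pair 2
  else keep_best_single dice

-- ===== PORT B =====
def keep_one_pair_alt (dice : List Int) : List Bool :=
  let counts := PySem.Dict.counter dice
  let pairs := (counts.items.filter (fun fc => decide (2 ≤ fc.2))).map (·.1)
  if pairs = [] then
    match PySem.List.max? dice (fun y => y) with
    | none => []        -- Python: max([]) raises ValueError; excluded by Pre_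
    | some m => dice.map (fun d => d == m)
  else
    match PySem.List.max? pairs (fun y => y) with
    | none => []        -- unreachable: pairs ≠ []
    | some p =>
      let higher := (counts.items.filter (fun fc => decide (p < fc.1) && decide (fc.2 = 1))).map (·.1)
      let h : Option Int := PySem.List.max? higher (fun y => y)   -- max(higher) if higher else None
      (dice.foldl (fun (st : Int × List Bool) d =>
          if d == p && decide (0 < st.1) then (st.1 - 1, st.2 ++ [true])
          else (st.1, st.2 ++ [some d == h])) ((2 : Int), [])).2

-- ===== PRECONDITION & SPEC =====
-- Pre_ excludes only the empty list, on which the Python A raises ValueError (max of empty sequence).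
def Pre_keep_one_pair (dice : List Int) : Prop := dice ≠ []
instance (dice : List Int) : Decidable (Pre_keep_one_pair dice) := by unfold Pre_keep_one_pair; infer_instance
def pvWitness_keep_one_pair : List Int := [1, 1, 3]

def Spec_keep_one_pair (dice : List Int) (out : List Bool) : Prop := out = keep_one_pair_alt dice
instance (dice : List Int) (out : List Bool) : Decidable (Spec_keep_one_pair dice out) := by unfold Spec_keep_one_pair; infer_instance

-- ===== CLAIM (what is proved, stated in full; the proofs are below) =====
def Claim_equal_keep_one_pair : Prop := ∀ (dice : List Int), Dom_keep_one_pair dice → Pre_keep_one_pair dice → Spec_keep_one_pair dice (keep_one_pair dice)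

-- ===== LEMMAS AND PROOFS =====


def kmask (f : Int) : List Int → Nat → List Bool
  | [], _ => []
  | d :: t, n => if d = f then decide (0 < n) :: kmask f t (n - 1) else false :: kmask f t n

def go (p : Int) (h : Option Int) : List Int → Int → List Bool
  | [], _ => []
  | d :: t, rem =>
      if d = p ∧ 0 < rem then true :: go p h t (rem - 1)
      else (some d == h) :: go p h t rem

lemma go_foldl (p : Int) (h : Option Int) :
    ∀ (t : List Int) (rem : Int) (acc : List Bool),
    (t.foldl (fun (st : Int × List Bool) d =>
        if d == p && decide (0 < st.1) then (st.1 - 1, st.2 ++ [true])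
        else (st.1, st.2 ++ [some d == h])) (rem, acc)).2 = acc ++ go p h t rem := by
  intro t
  induction t with
  | nil => intro rem acc; simp [go]
  | cons d t ih =>
    intro rem acc
    rw [List.foldl_cons]
    by_cases hc : d = p ∧ 0 < rem
    · have hb : (d == p && decide (0 < (rem, acc).1)) = true := by simp [hc.1, hc.2]
      rw [if_pos hb, ih, go, if_pos hc]
      simp
    · have hb : (d == p && decide (0 < (rem, acc).1)) = false := by
        rcases not_and_or.mp hc with h1 | h2
        · simp [h1]
        · simp [h2]
      rw [if_neg (by simp [hb]), ih, go, if_neg hc]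
      simp

lemma go_none (p : Int) : ∀ (t : List Int) (m : Nat), go p none t (m : Int) = kmask p t m := by
  intro t
  induction t with
  | nil => intro m; simp [go, kmask]
  | cons d t ih =>
    intro m
    by_cases hd : d = p
    · by_cases hm : 0 < m
      · have hc : ((m : Int)) - 1 = ((m - 1 : Nat) : Int) := by omega
        rw [go, if_pos ⟨hd, by exact_mod_cast hm⟩, hc, ih, kmask, if_pos hd]
        simp [hm]
      · have hm0 : m = 0 := by omega
        subst hm0
        rw [go, if_neg (by simp), kmask, if_pos hd]
        simpa using ih 0
    · rw [go, if_neg (by simp [hd]), kmask, if_neg hd, ih]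
      simp

lemma zip_or_kmask (p h : Int) (hne : p ≠ h) :
    ∀ (t : List Int) (m k : Nat), t.count h ≤ k →
    ((kmask p t m).zip (kmask h t k)).map (fun ab => ab.1 || ab.2) = go p (some h) t (m : Int) := by
  intro t
  induction t with
  | nil => intro m k _; simp [kmask, go]
  | cons d t ih =>
    intro m k hcnt
    by_cases hd : d = p
    · have hdh : ¬ d = h := by rw [hd]; exact hne
      have hcnt' : t.count h ≤ k := by
        simpa [List.count_cons, hdh] using hcnt
      by_cases hm : 0 < m
      · have hc : ((m : Int)) - 1 = ((m - 1 : Nat) : Int) := by omega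
        rw [kmask, if_pos hd, kmask, if_neg hdh, go, if_pos ⟨hd, by exact_mod_cast hm⟩, hc,
          ← ih (m - 1) k hcnt']
        simp [hm]
      · have hm0 : m = 0 := by omega
        subst hm0
        rw [kmask, if_pos hd, kmask, if_neg hdh, go, if_neg (by simp), ← ih 0 k hcnt']
        simp [hd, hne]
    · by_cases hdh : d = h
      · have hk : 1 ≤ k := by
          have h2 := hcnt; simp [hdh] at h2; omega
        have hcnt' : t.count h ≤ k - 1 := by
          have h2 := hcnt; simp [hdh] at h2; omega
        rw [kmask, if_neg hd, kmask, if_pos hdh, go, if_neg (by tauto), ← ih m (k - 1) hcnt']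
        simp [hdh]
        omega
      · have hcnt' : t.count h ≤ k := by
          simpa [List.count_cons, hdh] using hcnt
        rw [kmask, if_neg hd, kmask, if_neg hdh, go, if_neg (by tauto), ← ih m k hcnt']
        simp [hdh]

lemma single_mask (m : Int) :
    ∀ (t : List Int), t.count m = 1 → ∀ (k : Nat), PySem.List.index? t m = some k →
    (List.replicate t.length false).set k true = t.map (fun d => d == m) := by
  intro t
  induction t with
  | nil => intro h; simp at h
  | cons d t ih =>
    intro hcnt k hidx
    by_cases hd : d = m
    · subst hd
      rw [PySem.List.index?_cons_self] at hidx
      have hk : k = 0 := by simpa using hidx.symm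
      subst hk
      have hnot : d ∉ t := by
        have h2 := hcnt
        simp at h2
        exact (List.count_eq_zero).mp (by omega)
      have hmap : t.map (fun x => x == d) = List.replicate t.length false := by
        apply List.eq_replicate_iff.mpr
        refine ⟨by simp, ?_⟩
        intro b hb
        rcases List.mem_map.mp hb with ⟨x, hx, hxb⟩
        have hxd : ¬ x = d := fun he => hnot (he ▸ hx)
        rw [← hxb]; simp [hxd]
      simp [hmap, List.replicate_succ]
    · rw [PySem.List.index?_cons_of_ne t hd] at hidx
      rcases Option.map_eq_some_iff.mp hidx with ⟨k', hk', hkk⟩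
      have hcnt' : t.count m = 1 := by simpa [List.count_cons, hd] using hcnt
      have hrec := ih hcnt' k' hk'
      subst hkk
      simp [List.replicate_succ, hrec, hd]

lemma contains_ofList_decide (l : List Int) (x : Int) :
    PySem.Set.contains (PySem.Set.ofList l) x = decide (x ∈ l) := by
  by_cases h : x ∈ l
  · rw [(PySem.Set.contains_iff _ _).mpr ((PySem.Set.mem_ofList _ _).mpr h)]
    simp [h]
  · cases hcase : PySem.Set.contains (PySem.Set.ofList l) x
    · simp [h]
    · have hm := (PySem.Set.contains_iff _ _).mp hcase
      rw [PySem.Set.mem_ofList] at hm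
      exact absurd hm h

lemma idx_ge (f : Int) (t : List Int) (s : Int) (i : Int)
    (h : i ∈ ((PySem.List.enumerate t s).filter (fun q => q.2 == f)).map (·.1)) : s ≤ i := by
  rcases List.mem_map.mp h with ⟨q, hq, rfl⟩
  have hqe := List.mem_filter.mp hq |>.1
  rcases (PySem.List.mem_enumerate_iff t s q).mp hqe with ⟨k, hk, rfl⟩
  simp

lemma knof (f : Int) :
    ∀ (dice : List Int) (s : Int) (k : Nat),
    (PySem.List.pyRange s (s + (dice.length : Int)) 1).map
      (fun i => PySem.Set.contains (PySem.Set.ofList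
        ((((PySem.List.enumerate dice s).filter (fun q => q.2 == f)).map (·.1)).take k)) i)
    = kmask f dice k := by
  intro dice
  induction dice with
  | nil =>
    intro s k
    rw [PySem.List.pyRange_one_eq_nil (by simp)]
    simp [kmask]
  | cons d t ih =>
    intro s k
    simp only [contains_ofList_decide] at ih ⊢
    have hlen : s + (((d :: t).length : Nat) : Int) = (s + 1) + ((t.length : Nat) : Int) := by
      simp only [List.length_cons]
      push_cast
      ring
    have hrange : PySem.List.pyRange s (s + ((d :: t).length : Int)) 1
        = s :: PySem.List.pyRange (s + 1) ((s + 1) + (t.length : Int)) 1 := by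
      rw [hlen]
      exact PySem.List.pyRange_one_cons (by omega)
    rw [hrange, List.map_cons]
    rw [show PySem.List.enumerate (d :: t) s = (s, d) :: PySem.List.enumerate t (s + 1) from
      PySem.List.enumerate_cons d t s]
    by_cases hd : d = f
    · rw [show List.filter (fun q => q.2 == f) ((s, d) :: PySem.List.enumerate t (s + 1))
          = (s, d) :: List.filter (fun q => q.2 == f) (PySem.List.enumerate t (s + 1)) from by
        simp [hd]]
      rw [List.map_cons]
      dsimp only
      cases k with
      | zero =>
        simp only [List.take_zero]
        rw [kmask, if_pos hd]
        refine List.cons_eq_cons.mpr ⟨by simp, ?_⟩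
        have := ih (s + 1) 0
        simp only [List.take_zero] at this
        rw [← this]
        rfl
      | succ k' =>
        rw [List.take_succ_cons]
        rw [kmask, if_pos hd]
        refine List.cons_eq_cons.mpr ⟨by simp, ?_⟩
        simp only [Nat.add_sub_cancel]
        rw [← ih (s + 1) k']
        apply List.map_congr_left
        intro i hi
        have his : s + 1 ≤ i := (PySem.List.mem_pyRange_one.mp hi).1
        have hiff : (i ∈ s ::
            (((PySem.List.enumerate t (s + 1)).filter (fun q => q.2 == f)).map (·.1)).take k')
            ↔ i ∈ (((PySem.List.enumerate t (s + 1)).filter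
                (fun q => q.2 == f)).map (·.1)).take k' := by
          constructor
          · intro hmem
            rcases List.mem_cons.mp hmem with h1 | h1
            · omega
            · exact h1
          · exact fun h1 => List.mem_cons_of_mem _ h1
        exact decide_eq_decide.mpr hiff
    · rw [show List.filter (fun q => q.2 == f) ((s, d) :: PySem.List.enumerate t (s + 1))
          = List.filter (fun q => q.2 == f) (PySem.List.enumerate t (s + 1)) from by
        simp [hd]]
      rw [kmask, if_neg hd]
      refine List.cons_eq_cons.mpr ⟨?_, ih (s + 1) k⟩
      have hns : s ∉ (((PySem.List.enumerate t (s + 1)).filter (fun q => q.2 == f)).map (·.1)).take k := by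
        intro hmem
        have := idx_ge f t (s + 1) s (List.mem_of_mem_take hmem)
        omega
      simp [hns]

lemma keep_n_of_face_eq (dice : List Int) (f : Int) (n : Int) (hn : 0 ≤ n) :
    keep_n_of_face dice f n = kmask f dice n.toNat := by
  simp only [keep_n_of_face]
  rw [PySem.List.slice_to _ hn]
  have := knof f dice 0 n.toNat
  rw [zero_add] at this
  exact this

theorem keep_one_pair_eq (dice : List Int) (_hne : dice ≠ []) :
    keep_one_pair dice = keep_one_pair_alt dice := by
  have hpairs : ((PySem.Dict.counter dice).items.filter (fun fc => decide (2 ≤ fc.2))).map (·.1)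
      = (PySem.Set.ofList dice).filter (fun f => decide (2 ≤ dice.count f)) := by
    rw [PySem.Dict.items_counter, List.filter_map, List.map_map]
    have : ((fun fc : Int × Int => decide (2 ≤ fc.2)) ∘ fun k => (k, (dice.count k : Int)))
        = fun f => decide (2 ≤ dice.count f) := by
      funext k
      simp only [Function.comp]
      exact decide_eq_decide.mpr (by omega)
    rw [this]
    have h2 : ((fun x : Int × Int => x.1) ∘ fun k => (k, (dice.count k : Int))) = id := by
      funext k
      rfl
    rw [h2, List.map_id]
  simp only [keep_one_pair, keep_one_pair_alt, hpairs]
  by_cases hp : (PySem.Set.ofList dice).filter (fun f => decide (2 ≤ dice.count f)) = []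
  · rw [if_neg (not_not_intro hp), if_pos hp]
    simp only [keep_best_single]
    cases hmx : PySem.List.max? dice (fun y => y) with
    | none => rfl
    | some m =>
      dsimp only
      have hmem : m ∈ dice := PySem.List.max?_mem hmx
      have hcnt : dice.count m = 1 := by
        have h2 : ¬ (2 ≤ dice.count m) := by
          have := List.filter_eq_nil_iff.mp hp m ((PySem.Set.mem_ofList dice m).mpr hmem)
          simpa using this
        have h1 : 0 < dice.count m := List.count_pos_iff.mpr hmem
        omega
      cases hk : PySem.List.index? dice m with
      | none => exact absurd ((PySem.List.index?_eq_none_iff _ _).mp hk) (by simpa using hmem)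
      | some k =>
        dsimp only
        exact single_mask m dice hcnt k hk
  · rw [if_pos hp, if_neg hp]
    cases hmx : PySem.List.max? ((PySem.Set.ofList dice).filter (fun f => decide (2 ≤ dice.count f))) (fun y => y) with
    | none => exact absurd ((PySem.List.max?_eq_none_iff _ _).mp hmx) hp
    | some p =>
      dsimp only
      have hhigher : (PySem.Dict.counter dice).keys.filter
            (fun f => decide (p < f) && ((PySem.Dict.counter dice).getD f 0 == 1))
          = (PySem.Set.ofList dice).filter (fun f => decide (p < f) && decide (dice.count f = 1)) := by
        rw [PySem.Dict.keys_counter]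
        apply List.filter_congr
        intro f _
        rw [PySem.Dict.getD_counter]
        congr 1
        apply Bool.eq_iff_iff.mpr
        constructor
        · intro hb
          have := beq_iff_eq.mp hb
          simp
          omega
        · intro hb
          apply beq_iff_eq.mpr
          simp at hb
          omega
      have hhigherB : ((PySem.Dict.counter dice).items.filter
            (fun fc => decide (p < fc.1) && decide (fc.2 = 1))).map (·.1)
          = (PySem.Set.ofList dice).filter (fun f => decide (p < f) && decide (dice.count f = 1)) := by
        rw [PySem.Dict.items_counter, List.filter_map, List.map_map]
        have hpred : ((fun fc : Int × Int => decide (p < fc.1) && decide (fc.2 = 1))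
              ∘ fun k => (k, (dice.count k : Int)))
            = fun f => decide (p < f) && decide (dice.count f = 1) := by
          funext k
          simp only [Function.comp]
          congr 1
          exact decide_eq_decide.mpr (by omega)
        rw [hpred]
        have h2 : ((fun x : Int × Int => x.1) ∘ fun k => (k, (dice.count k : Int))) = id := by
          funext k
          rfl
        rw [h2, List.map_id]
      rw [hhigher, hhigherB]
      by_cases hh : (PySem.Set.ofList dice).filter (fun f => decide (p < f) && decide (dice.count f = 1)) = []
      · rw [if_neg (by simpa using hh)]
        rw [(PySem.List.max?_eq_none_iff _ _).mpr hh]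
        rw [keep_n_of_face_eq dice p 2 (by norm_num)]
        rw [go_foldl]
        have := go_none p dice 2
        norm_num at this ⊢
        exact this.symm
      · rw [if_pos (by simpa using hh)]
        cases hmh : PySem.List.max? ((PySem.Set.ofList dice).filter (fun f => decide (p < f) && decide (dice.count f = 1))) (fun y => y) with
        | none => exact absurd ((PySem.List.max?_eq_none_iff _ _).mp hmh) hh
        | some hm =>
          dsimp only
          have hmemh := PySem.List.max?_mem hmh
          have hcond := (List.mem_filter.mp hmemh).2
          have hplt : p < hm := by
            have := (Bool.and_eq_true _ _).mp hcond |>.1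
            simpa using this
          have hcnt1 : dice.count hm = 1 := by
            have := (Bool.and_eq_true _ _).mp hcond |>.2
            simpa using this
          rw [keep_n_of_face_eq dice p 2 (by norm_num), keep_n_of_face_eq dice hm 1 (by norm_num)]
          rw [go_foldl]
          have hz := zip_or_kmask p hm (ne_of_lt hplt) dice 2 1 (le_of_eq hcnt1)
          norm_num at hz ⊢
          exact hz

-- ===== VERDICT (by name: the statement is the Claim_ definition above) =====
theorem keep_one_pair_spec : Claim_equal_keep_one_pair := by
  intro dice _ hpre
  unfold Spec_keep_one_pair
  exact keep_one_pair_eq dice hpre
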